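-- pv_equiv track=rewrite | github.com/Tennessee-Wallaceh/seqjax | seqjax/cli/slurm_jobs.py | _cartesian_code_grid
-- ===== SOURCE A (Python) =====
-- import itertools
--
-- def _cartesian_code_grid(axes: dict[str, list[list[str]]]) -> list[tuple[str, ...]]:
--     if not axes:
--         return [tuple()]
--
--     axis_options = [axes[name] for name in axes]
--     combinations: list[tuple[str, ...]] = []
--     for option_set in itertools.product(*axis_options):
--         merged: list[str] = []
--         for bundle in option_set:
--             merged.extend(bundle)
--         combinations.append(tuple(merged))
--     return combinations
-- ===== SOURCE B (Python) =====
-- def _cartesian_code_grid(axes: dict[str, list[list[str]]]) -> list[tuple[str, ...]]: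
--     result: list[tuple[str, ...]] = [tuple()]
--     for name in axes:
--         result = [partial + tuple(bundle) for partial in result for bundle in axes[name]]
--     return result
-- ===== Notes on version B (the rewrite author's own statement) =====
-- stated objective: simpler
-- what changed: Replaces itertools.product over collected axis option lists plus an inner flattening loop with a single incremental fold that extends each partial tuple by each bundle of the next axis, making the empty-axes guard unnecessary.
import Mathlib
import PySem

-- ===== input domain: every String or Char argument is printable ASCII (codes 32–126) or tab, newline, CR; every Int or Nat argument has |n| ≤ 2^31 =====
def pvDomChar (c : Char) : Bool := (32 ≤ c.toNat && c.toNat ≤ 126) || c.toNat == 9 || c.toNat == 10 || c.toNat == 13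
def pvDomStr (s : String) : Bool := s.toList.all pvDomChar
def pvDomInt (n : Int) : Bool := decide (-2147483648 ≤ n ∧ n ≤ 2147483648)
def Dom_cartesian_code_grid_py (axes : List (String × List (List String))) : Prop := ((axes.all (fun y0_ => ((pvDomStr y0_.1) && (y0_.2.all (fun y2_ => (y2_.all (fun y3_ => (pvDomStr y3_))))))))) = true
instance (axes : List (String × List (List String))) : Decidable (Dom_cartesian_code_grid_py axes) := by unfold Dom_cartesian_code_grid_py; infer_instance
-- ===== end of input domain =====

-- B replaces itertools.product + an inner flatten loop by one incremental fold; objective: simpler.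

-- ===== PORT A =====
-- itertools.product(*lists): leftmost factor varies slowest, exactly Python's order.
def pyProduct (ls : List (List (List String))) : List (List (List String)) :=
  match ls with
  | [] => [[]]
  | xs :: rest => xs.flatMap (fun x => (pyProduct rest).map (fun tl => x :: tl))

def cartesian_code_grid_py (axes : List (String × List (List String))) : List (List String) :=
  if axes = [] then [[]]
  else
    -- 'axes[name] for name in axes': dict iteration yields each key once with its value, in insertion order
    let axis_options := axes.map (·.2)
    (pyProduct axis_options).map (fun option_set =>
      -- merged.extend(bundle) for each bundle in option_set
      option_set.foldl (fun merged bundle => merged ++ bundle) [])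

-- ===== PORT B =====
def cartesian_code_grid_py_alt (axes : List (String × List (List String))) : List (List String) :=
  axes.foldl
    (fun result kv =>
      result.flatMap (fun partial_ => kv.2.map (fun bundle => partial_ ++ bundle)))
    [[]]

-- ===== PRECONDITION & SPEC =====
def Spec_cartesian_code_grid_py (axes : List (String × List (List String))) (out : List (List String)) : Prop := out = cartesian_code_grid_py_alt axes
instance (axes : List (String × List (List String))) (out : List (List String)) : Decidable (Spec_cartesian_code_grid_py axes out) := by unfold Spec_cartesian_code_grid_py; infer_instance

-- ===== CLAIM (what is proved, stated in full; the proofs are below) =====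
def Claim_equal_cartesian_code_grid_py : Prop := ∀ (axes : List (String × List (List String))), Dom_cartesian_code_grid_py axes → Spec_cartesian_code_grid_py axes (cartesian_code_grid_py axes)

-- ===== LEMMAS AND PROOFS =====

-- A's inner loop is List.flatten
theorem foldl_append_eq_flatten (l : List (List String)) (acc : List String) :
    l.foldl (fun merged bundle => merged ++ bundle) acc = acc ++ l.flatten := by
  induction l generalizing acc with
  | nil => simp
  | cons x xs ih => simp [List.foldl_cons, ih, List.append_assoc]

-- flattened product of the tails, the value A computes
def flatProd (axes : List (String × List (List String))) : List (List String) :=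
  (pyProduct (axes.map (·.2))).map List.flatten

theorem flatProd_cons (kv : String × List (List String)) (rest : List (String × List (List String))) :
    flatProd (kv :: rest) =
      kv.2.flatMap (fun b => (flatProd rest).map (fun fl => b ++ fl)) := by
  simp [flatProd, pyProduct, List.map_flatMap, Function.comp_def, List.map_map]

-- B's fold from any accumulator
theorem foldl_fold_eq (axes : List (String × List (List String))) (acc : List (List String)) :
    axes.foldl
      (fun result kv =>
        result.flatMap (fun partial_ => kv.2.map (fun bundle => partial_ ++ bundle)))
      acc
    = acc.flatMap (fun p => (flatProd axes).map (fun fl => p ++ fl)) := by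
  induction axes generalizing acc with
  | nil => simp [flatProd, pyProduct]
  | cons kv rest ih =>
      rw [List.foldl_cons, ih, flatProd_cons]
      simp [List.flatMap_assoc, List.map_flatMap, List.flatMap_map, List.map_map,
        Function.comp_def, List.append_assoc]

-- ===== VERDICT (by name: the statement is the Claim_ definition above) =====
theorem cartesian_code_grid_py_spec : Claim_equal_cartesian_code_grid_py := by
  intro axes _
  unfold Spec_cartesian_code_grid_py cartesian_code_grid_py cartesian_code_grid_py_alt
  rw [foldl_fold_eq]
  cases axes with
  | nil => simp [flatProd, pyProduct]
  | cons kv rest =>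
      simp only [if_neg (List.cons_ne_nil kv rest)]
      have : ∀ os : List (List String),
          os.foldl (fun merged bundle => merged ++ bundle) ([] : List String) = os.flatten := by
        intro os; simpa using foldl_append_eq_flatten os []
      simp [flatProd, this]
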